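-- pv_equiv track=rewrite | github.com/mbirky/wordle_solver | main.py | calculate_word_weight
-- ===== SOURCE A (Python) =====
-- from collections import Counter
--
-- def calculate_word_weight(word, weights):
--     weight = 0
--     for c in word:
--         weight += weights[c]
--
--     # If unique characters increase weight
--     freq = Counter(word)
--     offset = 0
--     for key, value in freq.items():
--         offset += value * weights[key] - weights[key]
--     weight -= offset
--
--     return weight
-- ===== SOURCE B (Python) =====
-- def calculate_word_weight(word, weights):
--     return sum(weights[c] for c in set(word))
-- ===== Notes on version B (the rewrite author's own statement) =====
-- stated objective: simpler
-- what changed: Replaces A's three-pass total-minus-offset structure (sum over all characters, Counter of frequencies, offset loop and subtraction) with a single sum of the weights over the set of distinct characters.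
import Mathlib
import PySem

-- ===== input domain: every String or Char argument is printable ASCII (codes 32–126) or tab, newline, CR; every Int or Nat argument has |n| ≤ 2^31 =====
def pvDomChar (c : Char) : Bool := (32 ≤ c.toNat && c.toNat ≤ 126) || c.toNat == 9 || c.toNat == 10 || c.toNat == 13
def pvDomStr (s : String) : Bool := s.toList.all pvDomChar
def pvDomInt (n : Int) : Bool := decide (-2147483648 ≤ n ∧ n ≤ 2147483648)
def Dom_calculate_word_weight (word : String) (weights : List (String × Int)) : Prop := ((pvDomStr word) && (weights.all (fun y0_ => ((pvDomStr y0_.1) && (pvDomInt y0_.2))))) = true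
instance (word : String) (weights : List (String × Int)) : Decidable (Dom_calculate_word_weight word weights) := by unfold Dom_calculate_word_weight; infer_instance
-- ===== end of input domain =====

-- B replaces A's three-pass total-minus-offset computation by a single sum of weights over the distinct characters (simpler decomposition, same cost).


-- ===== PORT A =====
-- weights[c]: first-match lookup in the association list; under Pre_ it is always found (getD 0 is never the KeyError case).
def pyWVal (weights : List (String × Int)) (c : Char) : Int :=
  (List.lookup (String.mk [c]) weights).getD 0

def calculate_word_weight (word : String) (weights : List (String × Int)) : Int :=
  -- weight = 0; for c in word: weight += weights[c]
  let weight := word.toList.foldl (fun w c => w + pyWVal weights c) 0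
  -- freq = Counter(word)
  let freq := PySem.Dict.counter word.toList
  -- offset = 0; for key, value in freq.items(): offset += value * weights[key] - weights[key]
  let offset := freq.items.foldl
    (fun off kv => off + (kv.2 * pyWVal weights kv.1 - pyWVal weights kv.1)) 0
  weight - offset

-- ===== PORT B =====
-- return sum(weights[c] for c in set(word))
def calculate_word_weight_alt (word : String) (weights : List (String × Int)) : Int :=
  ((PySem.Set.ofList word.toList).map (fun c => pyWVal weights c)).sum

-- ===== PRECONDITION & SPEC =====
-- Pre_ excludes exactly the inputs where Python A raises KeyError: a character of word with no entry in weights.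
def Pre_calculate_word_weight (word : String) (weights : List (String × Int)) : Prop :=
  (word.toList.all (fun c => (List.lookup (String.mk [c]) weights).isSome)) = true
instance (word : String) (weights : List (String × Int)) : Decidable (Pre_calculate_word_weight word weights) := by unfold Pre_calculate_word_weight; infer_instance

def pvWitness_calculate_word_weight : String × (List (String × Int)) :=
  ("abba", [("a", 3), ("b", -2), ("c", 7)])

def Spec_calculate_word_weight (word : String) (weights : List (String × Int)) (out : Int) : Prop := out = calculate_word_weight_alt word weights
instance (word : String) (weights : List (String × Int)) (out : Int) : Decidable (Spec_calculate_word_weight word weights out) := by unfold Spec_calculate_word_weight; infer_instance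

-- ===== CLAIM (what is proved, stated in full; the proofs are below) =====
def Claim_equal_calculate_word_weight : Prop := ∀ (word : String) (weights : List (String × Int)), Dom_calculate_word_weight word weights → Pre_calculate_word_weight word weights → Spec_calculate_word_weight word weights (calculate_word_weight word weights)

-- ===== LEMMAS AND PROOFS =====

-- sum over a map with pointwise subtraction splits
theorem pv_sum_map_sub {α : Type} (l : List α) (g f : α → Int) :
    (l.map (fun k => g k - f k)).sum = (l.map g).sum - (l.map f).sum := by
  induction l with
  | nil => simp
  | cons x xs ih => simp [ih]; ring

-- for a nodup list the mapped sum is the Finset sum over its toFinset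
theorem pv_sum_map_nodup {α : Type} [DecidableEq α] (l : List α) (h : l.Nodup) (f : α → Int) :
    (l.map f).sum = ∑ x ∈ l.toFinset, f x := (List.sum_toFinset f h).symm

theorem pv_toFinset_ofList {α : Type} [DecidableEq α] (xs : List α) :
    (PySem.Set.ofList xs).toFinset = xs.toFinset := by
  ext y; simp [PySem.Set.mem_ofList]

-- total weight = sum over distinct characters of count * weight
theorem pv_total_eq {α : Type} [DecidableEq α] (xs : List α) (f : α → Int) :
    (xs.map f).sum = ((PySem.Set.ofList xs).map (fun k => (xs.count k : Int) * f k)).sum := by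
  rw [pv_sum_map_nodup _ (PySem.Set.nodup_ofList xs), pv_toFinset_ofList,
      Finset.sum_list_map_count xs f]
  refine Finset.sum_congr rfl (fun x _ => ?_)
  simp

theorem calculate_word_weight_eq_alt (word : String) (weights : List (String × Int)) :
    calculate_word_weight word weights = calculate_word_weight_alt word weights := by
  unfold calculate_word_weight calculate_word_weight_alt
  dsimp only
  set xs := word.toList with hxs
  set f := pyWVal weights with hf
  rw [PySem.List.foldl_add (g := f), PySem.Dict.items_counter xs]
  have h2 := PySem.List.foldl_add (l := (PySem.Set.ofList xs).map (fun k => (k, (xs.count k : Int))))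
    (g := fun kv : Char × Int => kv.2 * f kv.1 - f kv.1) (a := 0)
  rw [h2]
  rw [List.map_map]
  have h1 : ((PySem.Set.ofList xs).map
      ((fun kv : Char × Int => kv.2 * f kv.1 - f kv.1) ∘ fun k => (k, (xs.count k : Int)))).sum
      = ((PySem.Set.ofList xs).map (fun k => (xs.count k : Int) * f k)).sum
        - ((PySem.Set.ofList xs).map f).sum := by
    rw [← pv_sum_map_sub]
    rfl
  rw [h1, pv_total_eq xs f]
  ring

-- ===== VERDICT (by name: the statement is the Claim_ definition above) =====
theorem calculate_word_weight_spec : Claim_equal_calculate_word_weight := by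
  intro word weights _ _
  unfold Spec_calculate_word_weight
  exact calculate_word_weight_eq_alt word weights
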